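-- pv_equiv track=rewrite | github.com/approximatelylinear/gutenberg | api/gutenberg/ingestion.py | split_text_into_passages
-- ===== SOURCE A (Python) =====
-- def split_text_into_passages(
--         text,
--         split_characters=None,
--         max_length=2000,
--         min_length=100,
--     ):
--     if split_characters is None:
--         split_characters = ['\n\n', '\n'] + list('.?!,')
--     passages = []
--
--     def split_recursively(text, split_chars):
--         if len(text) <= max_length:
--             passages.append(text)
--             return
--
--         if not len(split_chars):
--             return
--
--         split_char = split_chars[0]
--         parts = text.split(split_char)
--
--         for part in parts:
--             if len(part) <= max_length:
--                 if (len(part) > 0):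
--                     passages.append(part)
--             else:
--                 split_recursively(part, split_chars[1:])
--
--     split_recursively(text, split_characters)
--     return passages
-- ===== SOURCE B (Python) =====
-- def split_text_into_passages(
--         text,
--         split_characters=None,
--         max_length=2000,
--         min_length=100,
--     ):
--     # Level-wise (round per split character) instead of recursive DFS: the
--     # output order is the same because splitting preserves left-to-right order.
--     if split_characters is None:
--         split_characters = ['\n\n', '\n', '.', '?', '!', ',']
--     if len(text) <= max_length:
--         return [text]
--     items = [(False, text)]  # (finished?, segment) in output order
--     for ch in split_characters:
--         nxt = []
--         for done, seg in items:
--             if done: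
--                 nxt.append((True, seg))
--             else:
--                 for part in seg.split(ch):
--                     if len(part) <= max_length:
--                         if part:
--                             nxt.append((True, part))
--                     else:
--                         nxt.append((False, part))
--         items = nxt
--     return [seg for done, seg in items if done]
-- ===== Notes on version B (the rewrite author's own statement) =====
-- stated objective: alternative
-- what changed: Replaces the recursive DFS helper with a mutable accumulator by an iterative level-wise pass: one round per split character transforms an ordered list of (finished, segment) items, relying on splits preserving left-to-right order.
-- outside the precondition, e.g. on split_text_into_passages('aaxbb', ['x', ''], 3, 0): A returns ['aa', 'bb'], B returns ['aa', 'bb']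
import Mathlib
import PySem

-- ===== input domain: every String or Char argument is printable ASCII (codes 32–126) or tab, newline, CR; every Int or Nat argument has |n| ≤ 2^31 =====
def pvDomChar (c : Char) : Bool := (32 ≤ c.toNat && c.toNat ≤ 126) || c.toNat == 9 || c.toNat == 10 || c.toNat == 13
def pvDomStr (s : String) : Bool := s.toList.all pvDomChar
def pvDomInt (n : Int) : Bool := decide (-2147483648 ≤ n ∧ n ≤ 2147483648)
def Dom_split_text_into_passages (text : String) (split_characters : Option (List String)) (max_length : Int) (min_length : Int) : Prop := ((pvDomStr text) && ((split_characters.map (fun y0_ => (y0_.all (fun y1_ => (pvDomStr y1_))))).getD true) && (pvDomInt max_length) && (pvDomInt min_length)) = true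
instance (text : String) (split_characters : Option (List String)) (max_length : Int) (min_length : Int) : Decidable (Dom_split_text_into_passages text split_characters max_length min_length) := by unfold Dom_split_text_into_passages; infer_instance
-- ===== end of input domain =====

-- B replaces A's recursive DFS helper by an iterative level-wise pass over the split
-- characters (an alternative of similar cost); min_length is unused by both, as in A.


-- shared primitive: t.split(sep); Python raises ValueError on an empty separator
-- (PySem.Str.split? = none there) — those inputs are excluded by Pre_ below.
def pvSplitPy (t sep : String) : List String := (PySem.Str.split? t sep).getD []

-- ===== PORT A =====
-- the inner 'def split_recursively(text, split_chars)': passages is the accumulator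
def pvSplitRecursively (max_length : Int) (split_chars : List String) (text : String)
    (passages : List String) : List String :=
  if PySem.Str.len text ≤ max_length then passages ++ [text]
  else
    match split_chars with
    | [] => passages
    | split_char :: rest =>
      (pvSplitPy text split_char).foldl (fun acc part =>
        if PySem.Str.len part ≤ max_length then
          (if PySem.Str.len part > 0 then acc ++ [part] else acc)
        else pvSplitRecursively max_length rest part acc) passages
termination_by split_chars.length
decreasing_by simp

def split_text_into_passages (text : String) (split_characters : Option (List String)) (max_length : Int) (min_length : Int) : List String :=
  let split_characters := split_characters.getD ["\n\n", "\n", ".", "?", "!", ","]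
  pvSplitRecursively max_length split_characters text []

-- ===== PORT B =====
-- one round: split every unfinished segment on ch, keeping output order
def pvLevelStep (max_length : Int) (ch : String) (items : List (Bool × String)) : List (Bool × String) :=
  items.foldl (fun nxt it =>
    if it.1 then nxt ++ [(true, it.2)]
    else (pvSplitPy it.2 ch).foldl (fun nxt2 part =>
      if PySem.Str.len part ≤ max_length then
        (if PySem.Str.len part > 0 then nxt2 ++ [(true, part)] else nxt2)
      else nxt2 ++ [(false, part)]) nxt) []

def split_text_into_passages_alt (text : String) (split_characters : Option (List String)) (max_length : Int) (min_length : Int) : List String :=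
  let chars := split_characters.getD ["\n\n", "\n", ".", "?", "!", ","]
  if PySem.Str.len text ≤ max_length then [text]
  else
    (chars.foldl (fun items ch => pvLevelStep max_length ch items) [(false, text)]).filterMap
      (fun it => if it.1 then some it.2 else none)

-- ===== PRECONDITION & SPEC =====
-- Pre_ excludes inputs whose explicit split-character list contains the empty string while the
-- text is longer than max_length: there the split may raise ValueError (empty separator); on the
-- excluded inputs where the empty separator is never reached A still returns normally.
def Pre_split_text_into_passages (text : String) (split_characters : Option (List String)) (max_length : Int) (min_length : Int) : Prop :=
  ∀ cs ∈ split_characters, ("" ∉ cs ∨ PySem.Str.len text ≤ max_length)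
instance (text : String) (split_characters : Option (List String)) (max_length : Int) (min_length : Int) : Decidable (Pre_split_text_into_passages text split_characters max_length min_length) := by unfold Pre_split_text_into_passages; infer_instance

def pvWitness_split_text_into_passages : String × Option (List String) × Int × Int :=
  ("hello, world. bye", some [". ", ","], 6, 1)

def Spec_split_text_into_passages (text : String) (split_characters : Option (List String)) (max_length : Int) (min_length : Int) (out : List String) : Prop := out = split_text_into_passages_alt text split_characters max_length min_length
instance (text : String) (split_characters : Option (List String)) (max_length : Int) (min_length : Int) (out : List String) : Decidable (Spec_split_text_into_passages text split_characters max_length min_length out) := by unfold Spec_split_text_into_passages; infer_instance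

-- ===== CLAIM (what is proved, stated in full; the proofs are below) =====
def Claim_equal_split_text_into_passages : Prop := ∀ (text : String) (split_characters : Option (List String)) (max_length : Int) (min_length : Int), Dom_split_text_into_passages text split_characters max_length min_length → Pre_split_text_into_passages text split_characters max_length min_length → Spec_split_text_into_passages text split_characters max_length min_length (split_text_into_passages text split_characters max_length min_length)

-- ===== LEMMAS AND PROOFS =====

-- denotation of A's recursion on an OVERSIZED segment (the recursive case body)
def pvDenote (max_length : Int) (chars : List String) (t : String) : List String :=
  match chars with
  | [] => []
  | c :: rest =>
    (pvSplitPy t c).flatMap (fun p =>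
      if PySem.Str.len p ≤ max_length then
        (if PySem.Str.len p > 0 then [p] else [])
      else pvDenote max_length rest p)

theorem pv_foldl_app {α β : Type} (g : β → List α) :
    ∀ (l : List β) (acc : List α),
      l.foldl (fun a p => a ++ g p) acc = acc ++ l.flatMap g := by
  intro l
  induction l with
  | nil => simp
  | cons x xs ih => intro acc; simp [List.foldl_cons, ih]

theorem pv_extract_eq :
    ∀ (l : List (Bool × String)),
      l.filterMap (fun it => if it.1 then some it.2 else none)
        = l.flatMap (fun it => if it.1 then [it.2] else []) := by
  intro l
  induction l with
  | nil => simp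
  | cons x xs ih =>
    cases x with
    | mk d s => cases d <;> simp [List.filterMap_cons, ih]

theorem pvSplitRecursively_eq (max_length : Int) :
    ∀ (chars : List String) (t : String) (acc : List String),
      pvSplitRecursively max_length chars t acc =
        acc ++ (if PySem.Str.len t ≤ max_length then [t] else pvDenote max_length chars t) := by
  intro chars
  induction chars with
  | nil =>
    intro t acc
    rw [pvSplitRecursively.eq_def]
    split_ifs with h <;> simp [pvDenote]
  | cons c rest ih =>
    intro t acc
    rw [pvSplitRecursively.eq_def]
    split_ifs with h
    · rfl
    · simp only [if_neg h, pvDenote]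
      have hf : (fun (a : List String) (part : String) =>
          if PySem.Str.len part ≤ max_length then
            (if PySem.Str.len part > 0 then a ++ [part] else a)
          else pvSplitRecursively max_length rest part a)
          = fun a part => a ++ (if PySem.Str.len part ≤ max_length then
              (if PySem.Str.len part > 0 then [part] else [])
            else pvDenote max_length rest part) := by
        funext a part
        by_cases h1 : PySem.Str.len part ≤ max_length
        · by_cases h2 : PySem.Str.len part > 0
          · simp only [if_pos h1, if_pos h2]
          · simp only [if_pos h1, if_neg h2, List.append_nil]
        · simp only [if_neg h1, ih, if_neg h1]
      rw [hf, pv_foldl_app]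

-- one level-step is a flatMap over the items
def pvStepItem (max_length : Int) (ch : String) (it : Bool × String) : List (Bool × String) :=
  if it.1 then [(true, it.2)]
  else (pvSplitPy it.2 ch).flatMap (fun p =>
    if PySem.Str.len p ≤ max_length then
      (if PySem.Str.len p > 0 then [(true, p)] else [])
    else [(false, p)])

theorem pvLevelStep_eq (max_length : Int) (ch : String) (items : List (Bool × String)) :
    pvLevelStep max_length ch items = items.flatMap (pvStepItem max_length ch) := by
  unfold pvLevelStep
  have hf : (fun (nxt : List (Bool × String)) (it : Bool × String) =>
      if it.1 then nxt ++ [(true, it.2)]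
      else (pvSplitPy it.2 ch).foldl (fun nxt2 part =>
        if PySem.Str.len part ≤ max_length then
          (if PySem.Str.len part > 0 then nxt2 ++ [(true, part)] else nxt2)
        else nxt2 ++ [(false, part)]) nxt)
      = fun nxt it => nxt ++ pvStepItem max_length ch it := by
    funext nxt it
    unfold pvStepItem
    split_ifs with h1
    · rfl
    · have hg : (fun (nxt2 : List (Bool × String)) (part : String) =>
          if PySem.Str.len part ≤ max_length then
            (if PySem.Str.len part > 0 then nxt2 ++ [(true, part)] else nxt2)
          else nxt2 ++ [(false, part)])
          = fun nxt2 part => nxt2 ++ (if PySem.Str.len part ≤ max_length then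
              (if PySem.Str.len part > 0 then [(true, part)] else [])
            else [(false, part)]) := by
        funext nxt2 part
        split_ifs <;> simp
      rw [hg, pv_foldl_app]
  rw [hf, pv_foldl_app]
  simp

theorem pvLoop_eq (max_length : Int) :
    ∀ (chars : List String) (items : List (Bool × String)),
      (chars.foldl (fun its ch => pvLevelStep max_length ch its) items).filterMap
          (fun it => if it.1 then some it.2 else none)
        = items.flatMap (fun it =>
            if it.1 then [it.2] else pvDenote max_length chars it.2) := by
  intro chars
  induction chars with
  | nil =>
    intro items
    simp only [List.foldl_nil]
    rw [pv_extract_eq]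
    simp [pvDenote]
  | cons c rest ih =>
    intro items
    rw [List.foldl_cons, ih, pvLevelStep_eq, List.flatMap_assoc]
    congr 1
    funext it
    unfold pvStepItem
    by_cases h1 : it.1
    · simp [h1]
    · simp only [if_neg h1, pvDenote]
      rw [List.flatMap_assoc]
      congr 1
      funext p
      split_ifs with h2 h3 <;> simp

-- ===== VERDICT (by name: the statement is the Claim_ definition above) =====
theorem split_text_into_passages_spec : Claim_equal_split_text_into_passages := by
  intro text split_characters max_length min_length _ _
  unfold Spec_split_text_into_passages split_text_into_passages split_text_into_passages_alt
  rw [pvSplitRecursively_eq]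
  split_ifs with h
  · simp
  · rw [pvLoop_eq]
    simp
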